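-- pv_equiv track=rewrite | github.com/dev-jlpt18/GLC-Interpreter | gcl.py | get_comma
-- ===== SOURCE A (Python) =====
-- def get_comma(incog):
--     comma = ""
--     range = len(incog)-1
--     if (range != 0):
--         comma += "c_{21}"
--         item = incog.pop()
--         comma += "(" + item + ")"
--         comma += "("+get_comma(incog)+")"
--         return comma
--     else:
--         item = incog.pop()
--         comma += item
--         return comma
-- ===== SOURCE B (Python) =====
-- def get_comma(incog):
--     items = []
--     while len(incog) - 1 != 0:
--         items.append(incog.pop())
--     result = incog.pop()
--     for item in reversed(items):
--         result = "c_{21}(" + item + ")(" + result + ")"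
--     return result
-- ===== Notes on version B (the rewrite author's own statement) =====
-- stated objective: simpler
-- what changed: Replaced A's recursion (which pops the last element and recurses on the rest, building string concatenations on the way back up) by an iterative version: pop all items into a list, then build the nested string with a single loop over the popped items in reverse; same list-emptying mutation and IndexError on empty input.
import Mathlib
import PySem

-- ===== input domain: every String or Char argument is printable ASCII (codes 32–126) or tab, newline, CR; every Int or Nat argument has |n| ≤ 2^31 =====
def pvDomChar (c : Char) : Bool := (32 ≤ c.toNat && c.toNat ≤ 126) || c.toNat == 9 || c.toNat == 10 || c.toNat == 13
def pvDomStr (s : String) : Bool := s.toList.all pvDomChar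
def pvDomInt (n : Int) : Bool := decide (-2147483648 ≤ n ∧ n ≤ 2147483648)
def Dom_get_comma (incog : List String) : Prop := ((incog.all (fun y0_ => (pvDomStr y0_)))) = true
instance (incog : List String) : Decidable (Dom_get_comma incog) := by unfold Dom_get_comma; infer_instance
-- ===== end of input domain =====

-- B replaces A's recursion by a pop-all loop plus one reverse fold (objective: simpler, no recursion).
-- Both Pythons empty the argument list in place (mutation); the equivalence proved is about the return value.

-- ===== PORT A =====
-- A: recursion popping the last element; "range ≠ 0" branch recurses on the remainder.
def get_comma (incog : List String) : String :=
  if incog.length - 1 ≠ 0 then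
    "c_{21}" ++ ("(" ++ incog.getLastD "" ++ ")") ++ ("(" ++ get_comma incog.dropLast ++ ")")
  else
    incog.getLastD ""
termination_by incog.length
decreasing_by
  simp only [List.length_dropLast]
  omega

-- ===== PORT B =====
-- while len(incog) - 1 != 0: items.append(incog.pop())   — returns (remaining list, items)
def pvPopLoop (incog items : List String) : List String × List String :=
  if incog.length - 1 ≠ 0 then
    pvPopLoop incog.dropLast (items ++ [incog.getLastD ""])
  else
    (incog, items)
termination_by incog.length
decreasing_by
  simp only [List.length_dropLast]
  omega

def get_comma_alt (incog : List String) : String :=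
  let p := pvPopLoop incog []
  -- result = incog.pop(); for item in reversed(items): result = "c_{21}(" + item + ")(" + result + ")"
  p.2.reverse.foldl (fun result item => "c_{21}(" ++ item ++ ")(" ++ result ++ ")") (p.1.getLastD "")

-- ===== PRECONDITION & SPEC =====
-- Pre_ excludes only the empty list, on which both Pythons raise IndexError (pop from empty list).
def Pre_get_comma (incog : List String) : Prop := incog ≠ []
instance (incog : List String) : Decidable (Pre_get_comma incog) := by unfold Pre_get_comma; infer_instance
def pvWitness_get_comma : List String := (["a", "b"])
def Spec_get_comma (incog : List String) (out : String) : Prop := out = get_comma_alt incog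
instance (incog : List String) (out : String) : Decidable (Spec_get_comma incog out) := by unfold Spec_get_comma; infer_instance

-- ===== CLAIM (what is proved, stated in full; the proofs are below) =====
def Claim_equal_get_comma : Prop := ∀ (incog : List String), Dom_get_comma incog → Pre_get_comma incog → Spec_get_comma incog (get_comma incog)

-- ===== LEMMAS AND PROOFS =====

def pvF (result item : String) : String := "c_{21}(" ++ item ++ ")(" ++ result ++ ")"

theorem pvF_A (i r : String) :
    "c_{21}" ++ ("(" ++ i ++ ")") ++ ("(" ++ r ++ ")") = pvF r i := by
  simp only [pvF, String.append_assoc]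
  rfl

theorem pvGetLastD (l : List String) (h : l ≠ []) : l.getLastD "" = l.getLast h := by
  simp [List.getLastD_eq_getLast?, List.getLast?_eq_some_getLast h]

-- the pop loop leaves exactly the head and collects the tail back-to-front
theorem pvPopLoop_spec : ∀ (n : ℕ) (incog items : List String), incog.length ≤ n → incog ≠ [] →
    pvPopLoop incog items = ([incog.headD ""], items ++ incog.tail.reverse) := by
  intro n
  induction n with
  | zero => intro incog items h hne; cases incog <;> simp_all
  | succ n ih =>
    intro incog items h hne
    rcases eq_or_ne (incog.length - 1) 0 with h1 | h1
    · unfold pvPopLoop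
      simp only [h1, ne_eq, not_true_eq_false, if_false]
      match incog, hne with
      | [x], _ => simp
      | (x :: y :: t), _ => simp at h1
    · unfold pvPopLoop
      simp only [h1, ne_eq, not_false_eq_true, if_true]
      have hlen : 2 ≤ incog.length := by
        cases incog with
        | nil => simp at hne
        | cons a t => cases t with
          | nil => simp at h1
          | cons b u => simp
      have hdne : incog.dropLast ≠ [] := by
        intro hc
        have := congrArg List.length hc
        simp [List.length_dropLast] at this
        omega
      rw [ih incog.dropLast _ (by simp [List.length_dropLast]; omega) hdne]
      match incog, hlen with
      | (a :: b :: t), _ =>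
        have hbt : (b :: t : List String) ≠ [] := by simp
        have hgl : (a :: b :: t).getLastD "" = (b :: t).getLast hbt := by
          rw [pvGetLastD (a :: b :: t) (by simp)]
          exact List.getLast_cons hbt
        have hrev : (b :: t).reverse = (b :: t).getLast hbt :: (b :: t).dropLast.reverse := by
          conv_lhs => rw [← List.dropLast_append_getLast hbt]
          simp
        have hd : (a :: b :: t).dropLast = a :: (b :: t).dropLast := rfl
        rw [hd, hgl]
        simp only [List.headD_cons, List.tail_cons, hrev, List.append_assoc]
        simp

theorem get_comma_alt_fold (incog : List String) (hne : incog ≠ []) :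
    get_comma_alt incog = incog.tail.foldl pvF (incog.headD "") := by
  unfold get_comma_alt
  rw [pvPopLoop_spec incog.length incog [] le_rfl hne]
  simp only [List.nil_append, List.reverse_reverse]
  rfl

theorem get_comma_fold : ∀ (n : ℕ) (incog : List String), incog.length ≤ n → incog ≠ [] →
    get_comma incog = incog.tail.foldl pvF (incog.headD "") := by
  intro n
  induction n with
  | zero => intro incog h hne; cases incog <;> simp_all
  | succ n ih =>
    intro incog h hne
    rcases eq_or_ne (incog.length - 1) 0 with h1 | h1
    · unfold get_comma
      simp only [h1, ne_eq, not_true_eq_false, if_false]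
      match incog, hne with
      | [x], _ => simp
      | (x :: y :: t), _ => simp at h1
    · unfold get_comma
      simp only [h1, ne_eq, not_false_eq_true, if_true]
      have hdne : incog.dropLast ≠ [] := by
        intro hc
        have := congrArg List.length hc
        cases incog with
        | nil => simp at hne
        | cons a t => cases t with
          | nil => simp at h1
          | cons b u => simp [List.length_dropLast] at this
      rw [ih incog.dropLast (by simp [List.length_dropLast]; omega) hdne]
      match incog, hne, h1 with
      | (a :: t), _, h1 =>
        have ht : t ≠ [] := by intro hc; subst hc; simp at h1
        have hd : (a :: t).dropLast = a :: t.dropLast := by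
          cases t with
          | nil => exact absurd rfl ht
          | cons b u => rfl
        have hgl : (a :: t).getLastD "" = t.getLast ht := by
          rw [pvGetLastD (a :: t) (by simp)]
          exact List.getLast_cons ht
        rw [hd, hgl]
        simp only [List.headD_cons, List.tail_cons]
        conv_rhs => rw [← List.dropLast_append_getLast ht]
        rw [List.foldl_append]
        simp only [List.foldl_cons, List.foldl_nil]
        exact pvF_A _ _

-- ===== VERDICT (by name: the statement is the Claim_ definition above) =====
theorem get_comma_spec : Claim_equal_get_comma := by
  intro incog _ hpre
  unfold Spec_get_comma
  rw [get_comma_alt_fold incog hpre, get_comma_fold incog.length incog le_rfl hpre]
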